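-- pv_equiv track=rewrite | github.com/nicolovitelli/WorkbookPython | 4 - Function Exercises/089.py | inserimento_maiuscole
-- ===== SOURCE A (Python) =====
-- def inserimento_maiuscole(stringa):
--     risultato = stringa.replace(" i ", " I ")
--     if len(stringa) > 0:
--         risultato = risultato[0].upper() + \
--             risultato[1 : len(risultato)]
--
--     posizione = 0
--     while posizione < len(stringa):
--         if risultato[posizione] == "." or risultato[posizione] == "!" or risultato[posizione] == "?":
--             posizione = posizione + 1
--             while posizione < len(stringa) and risultato[posizione] == " ":
--                 posizione = posizione + 1
--             if posizione < len(stringa):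
--                 risultato = risultato[0: posizione] + \
--                     risultato[posizione].upper() + \
--                     risultato[posizione + 1 : len(risultato)]
--         posizione = posizione + 1
--     return risultato
-- ===== SOURCE B (Python) =====
-- def inserimento_maiuscole(stringa):
--     s = stringa.replace(" i ", " I ")
--     if s:
--         s = s[0].upper() + s[1:]
--     out = []
--     pending = False
--     for c in s:
--         if pending and c != " ":
--             c = c.upper()
--             pending = False
--         elif c in ".!?":
--             pending = True
--         out.append(c)
--     return "".join(out)
-- ===== Notes on version B (the rewrite author's own statement) =====
-- stated objective: faster
-- what changed: A's while-loop scans by index and rebuilds the whole string with three slices at every sentence-ending punctuation mark; B does one left-to-right pass carrying a flag that marks where the next non-space character must be uppercased, and never re-slices.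
import Mathlib
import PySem

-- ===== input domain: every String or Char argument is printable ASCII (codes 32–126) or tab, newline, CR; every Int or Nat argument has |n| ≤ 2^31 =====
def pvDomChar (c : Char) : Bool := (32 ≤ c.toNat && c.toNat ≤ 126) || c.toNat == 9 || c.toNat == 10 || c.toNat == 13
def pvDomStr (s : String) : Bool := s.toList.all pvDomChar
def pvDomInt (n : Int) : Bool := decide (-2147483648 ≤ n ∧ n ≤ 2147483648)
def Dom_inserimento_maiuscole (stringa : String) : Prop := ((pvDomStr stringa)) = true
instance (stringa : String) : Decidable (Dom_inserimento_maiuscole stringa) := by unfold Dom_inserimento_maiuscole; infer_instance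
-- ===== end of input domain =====

-- B replaces A's index-arithmetic while-loop (which rebuilds the string by slicing at every
-- sentence end) with a single left-to-right pass carrying a "capitalize next" flag.

-- ===== PORT A =====
-- inner while: skip spaces ("while posizione < len(stringa) and risultato[posizione] == ' '")
-- (indexing is guarded by pos < n, and n = len(risultato) on every call, so getD is in range)
def pvSkipA (n : Nat) (ris : List Char) (pos : Nat) : Nat :=
  if _h : pos < n ∧ ris.getD pos ' ' = ' ' then pvSkipA n ris (pos + 1) else pos
termination_by n - pos
decreasing_by obtain ⟨h1, -⟩ := _h; omega

-- needed by pvLoopA's termination proof, so it stays above the port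
theorem pvSkipA_ge (n : Nat) (ris : List Char) (pos : Nat) : pos ≤ pvSkipA n ris pos := by
  fun_induction pvSkipA n ris pos with
  | case1 pos h ih => omega
  | case2 pos h => omega

-- outer while over posizione; the punct branch slices exactly as A does
def pvLoopA (n : Nat) (ris : List Char) (pos : Nat) : List Char :=
  if _h : pos < n then
    if ris.getD pos ' ' = '.' ∨ ris.getD pos ' ' = '!' ∨ ris.getD pos ' ' = '?' then
      pvLoopA n
        (if pvSkipA n ris (pos + 1) < n then
          ris.take (pvSkipA n ris (pos + 1)) ++
            [PySem.Chars.upperChar (ris.getD (pvSkipA n ris (pos + 1)) ' ')] ++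
            ris.drop (pvSkipA n ris (pos + 1) + 1)
        else ris)
        (pvSkipA n ris (pos + 1) + 1)
    else pvLoopA n ris (pos + 1)
  else ris
termination_by n - pos
decreasing_by
  · have := pvSkipA_ge n ris (pos + 1); omega
  · omega

def inserimento_maiuscole (stringa : String) : String :=
  let risultato := PySem.Str.replace stringa " i " " I "
  let risultato :=
    if PySem.Str.len stringa > 0 then
      -- risultato[0].upper() + risultato[1:len(risultato)]  (index 0 in range: len > 0)
      String.ofList (PySem.Chars.upperChar (risultato.toList.getD 0 ' ') ::
        PySem.List.slice risultato.toList (some 1) (some (PySem.Str.len risultato)))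
    else risultato
  String.ofList (pvLoopA stringa.toList.length risultato.toList 0)

-- ===== PORT B =====
-- the for-loop of Source B: one pass, `pending` = "capitalize the next non-space character"
def pvLoopB : List Char → Bool → List Char
  | [], _ => []
  | c :: rest, pending =>
    if pending && !(c == ' ') then
      PySem.Chars.upperChar c :: pvLoopB rest false
    else if c == '.' || c == '!' || c == '?' then
      c :: pvLoopB rest true
    else
      c :: pvLoopB rest pending

def inserimento_maiuscole_alt (stringa : String) : String :=
  let s := (PySem.Str.replace stringa " i " " I ").toList
  let s :=
    if s.length > 0 then
      -- s[0].upper() + s[1:]  (index 0 in range: s nonempty)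
      PySem.Chars.upperChar (s.getD 0 ' ') :: PySem.List.slice s (some 1) none
    else s
  String.ofList (pvLoopB s false)

-- ===== PRECONDITION & SPEC =====
def Spec_inserimento_maiuscole (stringa : String) (out : String) : Prop := out = inserimento_maiuscole_alt stringa
instance (stringa : String) (out : String) : Decidable (Spec_inserimento_maiuscole stringa out) := by unfold Spec_inserimento_maiuscole; infer_instance

-- ===== CLAIM (what is proved, stated in full; the proofs are below) =====
def Claim_equal_inserimento_maiuscole : Prop := ∀ (stringa : String), Dom_inserimento_maiuscole stringa → Spec_inserimento_maiuscole stringa (inserimento_maiuscole stringa)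

-- ===== LEMMAS AND PROOFS =====

-- replace with equal-length patterns preserves length
theorem replace_go_length (old new : List Char) (hlen : old.length = new.length) :
    ∀ (fuel : Nat) (l acc : List Char),
      (PySem.Chars.replace.go old new fuel l acc).length = acc.length + l.length := by
  intro fuel
  induction fuel with
  | zero => intro l acc; simp [PySem.Chars.replace.go]
  | succ fuel ih =>
    intro l acc
    cases l with
    | nil => simp [PySem.Chars.replace.go]
    | cons c t =>
      simp only [PySem.Chars.replace.go]
      split
      · rename_i hpre
        have hle : old.length ≤ (c :: t).length :=
          (List.isPrefixOf_iff_prefix.mp hpre).length_le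
        simp only [List.length_cons] at hle
        rw [ih]
        simp
        omega
      · rw [ih]; simp; omega

theorem replace_length (s : List Char) :
    (PySem.Chars.replace s (" i ".toList) (" I ".toList)).length = s.length := by
  rw [PySem.Chars.replace]
  simp only [show (" i ".toList.isEmpty) = false by decide, if_neg (by decide : ¬ (false = true))]
  rw [replace_go_length _ _ (by decide)]
  simp

theorem pvSkipA_spec (n : Nat) (ris : List Char) (pos : Nat) :
    (∀ i, pos ≤ i → i < pvSkipA n ris pos → ris.getD i ' ' = ' ' ∧ i < n) ∧
    (pvSkipA n ris pos < n → ¬ ris.getD (pvSkipA n ris pos) ' ' = ' ') := by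
  fun_induction pvSkipA n ris pos with
  | case1 pos h ih =>
    refine ⟨?_, ih.2⟩
    intro i hi1 hi2
    rcases Nat.eq_or_lt_of_le hi1 with rfl | hlt
    · exact ⟨h.2, h.1⟩
    · exact ih.1 i hlt hi2
  | case2 pos h =>
    exact ⟨fun i hi1 hi2 => absurd hi2 (by omega), fun hlt hsp => h ⟨hlt, hsp⟩⟩

theorem pvSkipA_le (n : Nat) (ris : List Char) (pos : Nat) (h : pos ≤ n) :
    pvSkipA n ris pos ≤ n := by
  fun_induction pvSkipA n ris pos with
  | case1 pos hc ih => exact ih hc.1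
  | case2 pos hc => exact h

theorem drop_eq_replicate_space (ris : List Char) (a b : Nat) (hb : b ≤ ris.length) (hab : a ≤ b)
    (hsp : ∀ i, a ≤ i → i < b → ris.getD i ' ' = ' ') :
    ris.drop a = List.replicate (b - a) ' ' ++ ris.drop b := by
  induction b, hab using Nat.le_induction with
  | base => simp
  | succ m hm ih =>
    rw [ih (by omega) (fun i h1 h2 => hsp i h1 (by omega))]
    have hmlen : m < ris.length := by omega
    rw [List.drop_eq_getElem_cons hmlen]
    have hsm : ris[m] = ' ' := by
      have := hsp m (by omega) (by omega)
      rwa [List.getD_eq_getElem ris ' ' hmlen] at this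
    rw [hsm, show m + 1 - a = (m - a) + 1 by omega, List.replicate_succ']
    simp

theorem pvLoopB_replicate (m : Nat) (l : List Char) :
    pvLoopB (List.replicate m ' ' ++ l) true = List.replicate m ' ' ++ pvLoopB l true := by
  induction m with
  | zero => simp
  | succ k ih => simp [List.replicate_succ, pvLoopB, ih]

theorem pvLoopB_replicate' (m : Nat) :
    pvLoopB (List.replicate m ' ') true = List.replicate m ' ' := by
  simpa [pvLoopB] using pvLoopB_replicate m []

theorem pvLoopA_eq (n : Nat) : ∀ (k : Nat) (ris : List Char) (pos : Nat),
    ris.length = n → n - pos = k →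
    pvLoopA n ris pos = ris.take pos ++ pvLoopB (ris.drop pos) false := by
  intro k
  induction k using Nat.strong_induction_on with
  | _ k ih =>
    intro ris pos hlen hk
    rw [pvLoopA]
    split
    · rename_i hpos
      have hposlen : pos < ris.length := by omega
      have hdrop : ris.drop pos = ris.getD pos ' ' :: ris.drop (pos + 1) := by
        rw [List.drop_eq_getElem_cons hposlen, List.getD_eq_getElem ris ' ' hposlen]
      split
      · rename_i hpunct
        set c := ris.getD pos ' ' with hc
        set p1 := pvSkipA n ris (pos + 1) with hp1
        have hge : pos + 1 ≤ p1 := pvSkipA_ge n ris (pos + 1)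
        have hle : p1 ≤ n := pvSkipA_le n ris (pos + 1) (by omega)
        obtain ⟨hsp, hstop⟩ := pvSkipA_spec n ris (pos + 1)
        rw [← hp1] at hsp hstop
        have hseg : ris.drop (pos + 1) = List.replicate (p1 - (pos + 1)) ' ' ++ ris.drop p1 :=
          drop_eq_replicate_space ris (pos + 1) p1 (by omega) hge
            (fun i h1 h2 => (hsp i h1 h2).1)
        have hBc : pvLoopB (ris.drop pos) false = c :: pvLoopB (ris.drop (pos + 1)) true := by
          rw [hdrop, pvLoopB]
          rcases hpunct with h | h | h <;> simp [h]
        have htakep1 : ris.take p1 = ris.take pos ++ c :: List.replicate (p1 - (pos + 1)) ' ' := by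
          conv_lhs => rw [show p1 = (pos + 1) + (p1 - (pos + 1)) by omega]
          have hcc : c = ris[pos] := by rw [hc, List.getD_eq_getElem ris ' ' hposlen]
          have hsucc : ris.take (pos + 1) = ris.take pos ++ [ris[pos]] := by
            rw [List.take_add_one, List.getElem?_eq_getElem hposlen]; rfl
          rw [List.take_add, hseg, List.take_left' (by simp), hsucc, hcc,
            List.append_assoc, List.singleton_append]
        split
        · rename_i hp1n
          have hp1len : p1 < ris.length := by omega
          set d := ris.getD p1 ' ' with hd
          set ris' := ris.take p1 ++ [PySem.Chars.upperChar d] ++ ris.drop (p1 + 1) with hris'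
          have htk : (ris.take p1).length = p1 := by simp; omega
          have hlen' : ris'.length = n := by
            simp [hris']; omega
          rw [ih (n - (p1 + 1)) (by omega) ris' (p1 + 1) hlen' rfl]
          have htake' : ris'.take (p1 + 1) = ris.take p1 ++ [PySem.Chars.upperChar d] := by
            rw [hris', List.append_assoc, List.take_append, htk]
            simp
          have hdrop' : ris'.drop (p1 + 1) = ris.drop (p1 + 1) := by
            rw [hris', List.append_assoc, List.drop_append, htk]
            simp
          rw [htake', hdrop', hBc, hseg, pvLoopB_replicate]
          have hdropp1 : ris.drop p1 = d :: ris.drop (p1 + 1) := by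
            rw [List.drop_eq_getElem_cons hp1len, hd, List.getD_eq_getElem ris ' ' hp1len]
          have hdns : ¬ d = ' ' := hstop hp1n
          have hBd : pvLoopB (ris.drop p1) true =
              PySem.Chars.upperChar d :: pvLoopB (ris.drop (p1 + 1)) false := by
            rw [hdropp1, pvLoopB]
            simp [hdns]
          rw [hBd, htakep1]
          simp
        · rename_i hp1n
          have hp1eq : p1 = n := by omega
          have hend : ris.drop p1 = [] := List.drop_eq_nil_of_le (by omega)
          rw [ih (n - (p1 + 1)) (by omega) ris (p1 + 1) hlen rfl]
          have hend1 : ris.drop (p1 + 1) = [] := List.drop_eq_nil_of_le (by omega)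
          rw [hend1, List.take_of_length_le (by omega), hBc, hseg, hend,
            List.append_nil, pvLoopB_replicate']
          have hB0 : pvLoopB ([] : List Char) false = [] := rfl
          rw [hB0, List.append_nil]
          conv_lhs => rw [show ris = ris.take p1 from (List.take_of_length_le (by omega)).symm]
          rw [htakep1]
      · rename_i hnp
        rw [ih (n - (pos + 1)) (by omega) ris (pos + 1) hlen rfl]
        have hBc : pvLoopB (ris.drop pos) false =
            ris.getD pos ' ' :: pvLoopB (ris.drop (pos + 1)) false := by
          rw [hdrop, pvLoopB]
          have h1 : ¬ ris.getD pos ' ' = '.' := fun h => hnp (Or.inl h)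
          have h2 : ¬ ris.getD pos ' ' = '!' := fun h => hnp (Or.inr (Or.inl h))
          have h3 : ¬ ris.getD pos ' ' = '?' := fun h => hnp (Or.inr (Or.inr h))
          simp only [List.getD] at h1 h2 h3
          simp [h1, h2, h3]
        have hsucc : ris.take (pos + 1) = ris.take pos ++ [ris[pos]] := by
          rw [List.take_add_one, List.getElem?_eq_getElem hposlen]; rfl
        rw [hBc, hsucc, List.getD_eq_getElem ris ' ' hposlen,
          List.append_assoc, List.singleton_append]
    · rename_i hpos
      rw [List.take_of_length_le (by omega), List.drop_eq_nil_of_le (by omega)]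
      simp [pvLoopB]

-- ===== VERDICT (by name: the statement is the Claim_ definition above) =====
theorem replaced_length (stringa : String) :
    (PySem.Str.replace stringa " i " " I ").toList.length = stringa.toList.length := by
  rw [PySem.Str.toList_replace]
  exact replace_length _

theorem inserimento_maiuscole_spec : Claim_equal_inserimento_maiuscole := by
  unfold Claim_equal_inserimento_maiuscole Spec_inserimento_maiuscole
  intro stringa _
  simp only [inserimento_maiuscole, inserimento_maiuscole_alt]
  have hRlen := replaced_length stringa
  set R := (PySem.Str.replace stringa " i " " I ").toList with hR
  by_cases h0 : stringa.toList.length > 0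
  · have hcondA : PySem.Str.len stringa > 0 := by
      simp only [PySem.Str.len]; exact_mod_cast h0
    have hcondB : R.length > 0 := by omega
    rw [if_pos hcondA, if_pos hcondB]
    have hlenR : PySem.Str.len (PySem.Str.replace stringa " i " " I ") = (R.length : Int) := by
      simp only [PySem.Str.len, hR]
    have hsliceA : PySem.List.slice R (some 1) (some (R.length : Int)) = R.drop 1 := by
      rw [show ((1 : Int)) = ((1 : Nat) : Int) by norm_num, PySem.List.slice_natCast]
      exact List.take_of_length_le (by simp)
    have hsliceB : PySem.List.slice R (some 1) none = R.drop 1 := by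
      rw [PySem.List.slice_from_one, ← List.drop_one]
    rw [hlenR, String.toList_ofList, hsliceA, hsliceB]
    have hLlen : (PySem.Chars.upperChar (R.getD 0 ' ') :: R.drop 1).length =
        stringa.toList.length := by
      simp only [List.length_cons, List.length_drop]; omega
    rw [pvLoopA_eq stringa.toList.length (stringa.toList.length - 0)
      (PySem.Chars.upperChar (R.getD 0 ' ') :: R.drop 1) 0 hLlen rfl]
    simp
  · have hcondA : ¬ PySem.Str.len stringa > 0 := by
      simp only [PySem.Str.len]; omega
    have hcondB : ¬ R.length > 0 := by omega
    rw [if_neg hcondA, if_neg hcondB]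
    have hRnil : R = [] := List.eq_nil_of_length_eq_zero (by omega)
    rw [← hR, hRnil]
    rw [pvLoopA_eq stringa.toList.length (stringa.toList.length - 0) [] 0 (by simp only [List.length_nil]; omega) rfl]
    simp [pvLoopB]
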